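-- pv_equiv track=rewrite | github.com/aThoughtfulSoul/rive-navigator | agent/tools/rive_docs_lookup.py | _expand_query_text
-- ===== SOURCE A (Python) =====
-- def _expand_query_text(text: str) -> str:
--     lowered = text.lower()
--     extras: list[str] = []
--
--     if "new file" in lowered or "fresh file" in lowered or "blank file" in lowered:
--         extras.extend(["artboard", "stage"])
--     if "artboard" in lowered:
--         extras.extend(["stage", "create artboard"])
--     if "circle" in lowered or "ellipse" in lowered:
--         extras.extend(["ellipse", "procedural shape"])
--     if "rectangle" in lowered or "shape" in lowered:
--         extras.append("procedural shape")
--     if any(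
--         term in lowered
--         for term in (
--             "shortcut",
--             "keyboard",
--             "select tool",
--             "ellipse",
--             "circle",
--             "rectangle",
--             "artboard tool",
--             "pen tool",
--             "bone tool",
--             "switch mode",
--             "animate mode",
--             "design mode",
--         )
--     ):
--         extras.append("keyboard shortcuts")
--     if any(
--         term in lowered
--         for term in (
--             "find artboard",
--             "find the artboard",
--             "center artboard",
--             "center the artboard",
--             "lost artboard",
--             "lost the artboard",
--             "fit artboard",
--             "fit the artboard",
--             "fit to screen",
--             "zoom to fit",
--             "zoom-to-fit",
--         )
--     ):
--         extras.extend(["stage", "fit", "screen"])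
--
--     if not extras:
--         return text
--     return f"{text} {' '.join(extras)}"
-- ===== SOURCE B (Python) =====
-- # Position-sweep re-implementation: one left-to-right scan over text positions collects the
-- # set of keywords that start somewhere in the text; the expansion is then assembled from that set.
-- _RULES = [
--     (("new file", "fresh file", "blank file"), ["artboard", "stage"]),
--     (("artboard",), ["stage", "create artboard"]),
--     (("circle", "ellipse"), ["ellipse", "procedural shape"]),
--     (("rectangle", "shape"), ["procedural shape"]),
--     (
--         (
--             "shortcut", "keyboard", "select tool", "ellipse", "circle",
--             "rectangle", "artboard tool", "pen tool", "bone tool",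
--             "switch mode", "animate mode", "design mode",
--         ),
--         ["keyboard shortcuts"],
--     ),
--     (
--         (
--             "find artboard", "find the artboard", "center artboard",
--             "center the artboard", "lost artboard", "lost the artboard",
--             "fit artboard", "fit the artboard", "fit to screen",
--             "zoom to fit", "zoom-to-fit",
--         ),
--         ["stage", "fit", "screen"],
--     ),
-- ]
--
-- _PATTERNS = tuple(p for pats, _ in _RULES for p in pats)
--
--
-- def _expand_query_text(text: str) -> str:
--     lowered = text.lower()
--     # Single sweep: at each position record every keyword that starts there.
--     hits = set()
--     for j in range(len(lowered) + 1):
--         for p in _PATTERNS: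
--             if lowered.startswith(p, j):
--                 hits.add(p)
--     extras = []
--     for pats, adds in _RULES:
--         if not hits.isdisjoint(pats):
--             extras.extend(adds)
--     return text if not extras else f"{text} {' '.join(extras)}"
-- ===== Notes on version B (the rewrite author's own statement) =====
-- stated objective: alternative
-- what changed: Instead of testing each keyword with its own substring search `p in lowered`, B makes one left-to-right sweep over text positions collecting the set of keywords that start at each position, then assembles the expansion terms by set-intersection of each rule's keyword tuple with that hit set.
import Mathlib
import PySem

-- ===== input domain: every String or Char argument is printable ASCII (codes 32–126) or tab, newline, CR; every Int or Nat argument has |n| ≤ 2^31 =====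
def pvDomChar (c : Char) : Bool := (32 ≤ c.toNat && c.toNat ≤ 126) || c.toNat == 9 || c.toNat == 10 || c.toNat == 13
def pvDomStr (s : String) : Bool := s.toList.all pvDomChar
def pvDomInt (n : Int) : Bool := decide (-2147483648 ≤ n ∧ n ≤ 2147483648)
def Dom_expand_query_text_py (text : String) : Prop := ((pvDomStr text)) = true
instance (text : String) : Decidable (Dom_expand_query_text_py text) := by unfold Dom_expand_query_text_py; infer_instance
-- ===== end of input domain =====

-- B replaces A's per-keyword substring tests by a single position sweep that collects the set of
-- matched keywords, then assembles the extras from that set (alternative algorithm; same cost).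


-- ===== PORT A =====
def expand_query_text_py (text : String) : String :=
  let lowered := PySem.Str.lower text
  let extras : List String := []
  let extras := if PySem.Str.isIn "new file" lowered || PySem.Str.isIn "fresh file" lowered
      || PySem.Str.isIn "blank file" lowered then extras ++ ["artboard", "stage"] else extras
  let extras := if PySem.Str.isIn "artboard" lowered then extras ++ ["stage", "create artboard"] else extras
  let extras := if PySem.Str.isIn "circle" lowered || PySem.Str.isIn "ellipse" lowered
      then extras ++ ["ellipse", "procedural shape"] else extras
  let extras := if PySem.Str.isIn "rectangle" lowered || PySem.Str.isIn "shape" lowered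
      then extras ++ ["procedural shape"] else extras
  let extras := if (["shortcut", "keyboard", "select tool", "ellipse", "circle", "rectangle",
        "artboard tool", "pen tool", "bone tool", "switch mode", "animate mode",
        "design mode"].any (fun term => PySem.Str.isIn term lowered))
      then extras ++ ["keyboard shortcuts"] else extras
  let extras := if (["find artboard", "find the artboard", "center artboard", "center the artboard",
        "lost artboard", "lost the artboard", "fit artboard", "fit the artboard",
        "fit to screen", "zoom to fit", "zoom-to-fit"].any (fun term => PySem.Str.isIn term lowered))
      then extras ++ ["stage", "fit", "screen"] else extras
  if extras = [] then text else text ++ " " ++ PySem.Str.join " " extras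

-- ===== PORT B =====
def pvRules : List (List String × List String) :=
  [ (["new file", "fresh file", "blank file"], ["artboard", "stage"])
  , (["artboard"], ["stage", "create artboard"])
  , (["circle", "ellipse"], ["ellipse", "procedural shape"])
  , (["rectangle", "shape"], ["procedural shape"])
  , ( ["shortcut", "keyboard", "select tool", "ellipse", "circle", "rectangle",
       "artboard tool", "pen tool", "bone tool", "switch mode", "animate mode", "design mode"]
    , ["keyboard shortcuts"])
  , ( ["find artboard", "find the artboard", "center artboard", "center the artboard",
       "lost artboard", "lost the artboard", "fit artboard", "fit the artboard",
       "fit to screen", "zoom to fit", "zoom-to-fit"]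
    , ["stage", "fit", "screen"]) ]

-- _PATTERNS = tuple(p for pats, _ in _RULES for p in pats)
def pvPatterns : List String := pvRules.foldl (fun acc r => acc ++ r.1) []

-- the position sweep: hits = {p : p starts at some j};
-- lowered.startswith(p, j) is exactly startswith on the j-suffix (0 ≤ j), ported as such
def pvHits (lowered : List Char) : PySem.Set String :=
  (List.range (lowered.length + 1)).foldl
    (fun hs j =>
      pvPatterns.foldl
        (fun hs p =>
          if PySem.Chars.startswith (lowered.drop j) p.toList then PySem.Set.add hs p else hs)
        hs)
    PySem.Set.empty

def expand_query_text_py_alt (text : String) : String :=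
  let lowered := (PySem.Str.lower text).toList
  let hits := pvHits lowered
  let extras : List String :=
    pvRules.foldl
      (fun acc r => if !(PySem.Set.isdisjoint hits r.1) then acc ++ r.2 else acc) []
  if extras = [] then text else text ++ " " ++ PySem.Str.join " " extras

-- ===== PRECONDITION & SPEC =====
def Spec_expand_query_text_py (text : String) (out : String) : Prop := out = expand_query_text_py_alt text
instance (text : String) (out : String) : Decidable (Spec_expand_query_text_py text out) := by unfold Spec_expand_query_text_py; infer_instance

-- ===== CLAIM =====
def Claim_equal_expand_query_text_py : Prop := ∀ (text : String), Dom_expand_query_text_py text → Spec_expand_query_text_py text (expand_query_text_py text)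

-- ===== LEMMAS AND PROOFS =====

-- membership in the inner fold over patterns
lemma mem_inner_fold (pats : List String) (c : String → Bool) (hs : PySem.Set String) (x : String) :
    x ∈ pats.foldl (fun hs p => if c p then PySem.Set.add hs p else hs) hs ↔
      x ∈ hs ∨ (x ∈ pats ∧ c x = true) := by
  induction pats generalizing hs with
  | nil => simp
  | cons p ps ih =>
      by_cases hc : c p = true
      · simp only [List.foldl_cons, if_pos hc, ih, PySem.Set.mem_add, List.mem_cons]
        aesop
      · simp only [List.foldl_cons, if_neg hc, ih, List.mem_cons]
        aesop

-- membership in the outer fold over positions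
lemma mem_outer_fold (lowered : List Char) (js : List Nat) (hs : PySem.Set String) (x : String) :
    x ∈ js.foldl
        (fun hs j =>
          pvPatterns.foldl
            (fun hs p =>
              if PySem.Chars.startswith (lowered.drop j) p.toList then PySem.Set.add hs p else hs)
            hs)
        hs ↔
      x ∈ hs ∨ (x ∈ pvPatterns ∧ ∃ j ∈ js, PySem.Chars.startswith (lowered.drop j) x.toList = true) := by
  induction js generalizing hs with
  | nil => simp
  | cons j js ih =>
      simp only [List.foldl_cons, ih, mem_inner_fold, List.mem_cons]
      constructor
      · rintro ((h | ⟨hm, hc⟩) | ⟨hm, j', hj', hc⟩)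
        · exact Or.inl h
        · exact Or.inr ⟨hm, j, Or.inl rfl, hc⟩
        · exact Or.inr ⟨hm, j', Or.inr hj', hc⟩
      · rintro (h | ⟨hm, j', (rfl | hj'), hc⟩)
        · exact Or.inl (Or.inl h)
        · exact Or.inl (Or.inr ⟨hm, hc⟩)
        · exact Or.inr ⟨hm, j', hj', hc⟩

-- the sweep finds exactly the patterns occurring as substrings
lemma mem_pvHits (lowered : List Char) (x : String) :
    x ∈ pvHits lowered ↔ x ∈ pvPatterns ∧ PySem.Chars.isIn x.toList lowered = true := by
  unfold pvHits
  rw [mem_outer_fold]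
  simp only [PySem.Set.empty, List.not_mem_nil, false_or, List.mem_range]
  constructor
  · rintro ⟨hm, j, hj, hc⟩
    refine ⟨hm, ?_⟩
    exact (PySem.Chars.exists_prefix_drop_iff_isIn _ _).1 ⟨j, (PySem.Chars.startswith_iff _ _).1 hc⟩
  · rintro ⟨hm, hin⟩
    refine ⟨hm, ?_⟩
    obtain ⟨j, hj⟩ := (PySem.Chars.exists_prefix_drop_iff_isIn _ _).2 hin
    by_cases hle : j ≤ lowered.length
    · exact ⟨j, by omega, (PySem.Chars.startswith_iff _ _).2 hj⟩
    · have hnil : lowered.drop j = [] := List.drop_eq_nil_of_le (by omega)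
      rw [hnil] at hj
      have hx : x.toList = [] := List.prefix_nil.1 hj
      exact ⟨lowered.length, by omega,
        (PySem.Chars.startswith_iff _ _).2 (by rw [hx]; exact List.nil_prefix)⟩

-- the set-intersection rule test equals A's per-keyword substring tests
lemma notdisjoint_pvHits (lowered : List Char) (pats : List String)
    (hsub : ∀ x ∈ pats, x ∈ pvPatterns) :
    (!(PySem.Set.isdisjoint (pvHits lowered) pats)) =
      pats.any (fun p => PySem.Chars.isIn p.toList lowered) := by
  rw [Bool.eq_iff_iff]
  simp only [Bool.not_eq_true', List.any_eq_true]
  constructor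
  · intro hfalse
    have : ¬ (∀ x ∈ pvHits lowered, x ∉ pats) := by
      intro hall
      exact absurd ((PySem.Set.isdisjoint_iff _ _).2 hall) (by simp [hfalse])
    push Not at this
    obtain ⟨x, hx, hxp⟩ := this
    exact ⟨x, hxp, ((mem_pvHits _ _).1 hx).2⟩
  · rintro ⟨p, hp, hin⟩
    by_contra hne
    have hdisj : PySem.Set.isdisjoint (pvHits lowered) pats = true := by
      cases h : PySem.Set.isdisjoint (pvHits lowered) pats
      · exact absurd h hne
      · rfl
    exact (PySem.Set.isdisjoint_iff _ _).1 hdisj p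
      ((mem_pvHits _ _).2 ⟨hsub p hp, hin⟩) hp

-- ===== VERDICT =====
theorem expand_query_text_py_spec : Claim_equal_expand_query_text_py := by
  intro text _
  unfold Spec_expand_query_text_py expand_query_text_py expand_query_text_py_alt
  have hlow : ∀ sub : String, PySem.Str.isIn sub (PySem.Str.lower text)
      = PySem.Chars.isIn sub.toList (PySem.Str.lower text).toList := by
    intro sub; simp [pysem]
  simp only [pvRules, List.foldl_cons, List.foldl_nil]
  rw [notdisjoint_pvHits _ _ (by decide), notdisjoint_pvHits _ _ (by decide),
      notdisjoint_pvHits _ _ (by decide), notdisjoint_pvHits _ _ (by decide),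
      notdisjoint_pvHits _ _ (by decide), notdisjoint_pvHits _ _ (by decide)]
  simp only [List.any_cons, List.any_nil, Bool.or_false, hlow, Bool.or_assoc]
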